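-- pv_equiv track=rewrite | github.com/JRBarreraM/ALGO1 | Lab08Ejercicio3.py | numNoNulasCol
-- ===== SOURCE A (Python) =====
-- def numNoNulasCol(A=list,fil=int,col=int)->int:
-- # { ​Pre:​ True }
-- # { ​Post:​ r = (#i: 0<=i<col: A[fil][i]!=0) }
-- # { ​Cota:​ col }
--  	#VARIABLES
-- 		# r: int // Numero de casillas no nulas en columna.
-- 	if col==0:
-- 		if A[fil][col]==0:
-- 			r=0
-- 		else:
-- 			r=1
-- 		return r
-- 	else:
-- 		if A[fil][col]==0:
-- 			r=0
-- 		else: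
-- 			r=1
-- 		return r+numNoNulasCol(A,fil,col-1)
-- ===== SOURCE B (Python) =====
-- def numNoNulasCol(A=list, fil=int, col=int) -> int:
--     # Iterative single pass: count non-zero entries A[fil][0..col].
--     row = A[fil]
--     r = 0
--     for i in range(col + 1):
--         if row[i] != 0:
--             r += 1
--     return r
-- ===== Notes on version B (the rewrite author's own statement) =====
-- stated objective: simpler
-- what changed: Replaced the back-to-front recursion (one stack frame per column) with a single iterative counting loop over range(col+1).
import Mathlib
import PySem

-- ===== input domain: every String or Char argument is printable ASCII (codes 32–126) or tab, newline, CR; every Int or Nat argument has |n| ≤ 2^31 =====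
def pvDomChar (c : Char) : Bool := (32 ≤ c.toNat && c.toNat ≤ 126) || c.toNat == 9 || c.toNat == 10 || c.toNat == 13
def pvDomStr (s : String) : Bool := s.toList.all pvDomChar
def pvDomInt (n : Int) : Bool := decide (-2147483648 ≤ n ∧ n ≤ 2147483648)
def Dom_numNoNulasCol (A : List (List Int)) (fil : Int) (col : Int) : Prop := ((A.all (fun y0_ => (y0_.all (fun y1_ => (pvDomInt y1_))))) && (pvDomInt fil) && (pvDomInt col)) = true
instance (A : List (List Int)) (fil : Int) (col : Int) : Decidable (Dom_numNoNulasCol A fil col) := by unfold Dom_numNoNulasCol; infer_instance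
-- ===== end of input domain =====

-- B replaces A's back-to-front recursion by a single iterative counting loop (simpler; same reads, no recursion).

-- ===== PORT A =====
-- A recurses on col down to 0; Pre_ restricts to 0 ≤ col (below it Python raises), so the
-- recursion is transcribed on the fuel col.toNat, each step reading A[fil][n] exactly as A does.
def numNoNulasColGo (A : List (List Int)) (fil : Int) : Nat → Int
  | 0 => if PySem.List.pyGetD (PySem.List.pyGetD A fil []) (0 : Int) 0 == 0 then 0 else 1
  | n + 1 =>
      (if PySem.List.pyGetD (PySem.List.pyGetD A fil []) ((n : Int) + 1) 0 == 0 then 0 else 1)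
        + numNoNulasColGo A fil n

def numNoNulasCol (A : List (List Int)) (fil : Int) (col : Int) : Int :=
  numNoNulasColGo A fil col.toNat

-- ===== PORT B =====
def numNoNulasCol_alt (A : List (List Int)) (fil : Int) (col : Int) : Int :=
  let row := PySem.List.pyGetD A fil []
  (PySem.List.pyRange 0 (col + 1) 1).foldl
    (fun r i => if PySem.List.pyGetD row i 0 ≠ 0 then r + 1 else r) 0

-- ===== PRECONDITION & SPEC =====
-- Pre_: the inputs where Python A returns normally: col ≥ 0, fil a valid (possibly negative) row
-- index, and col within the row (otherwise A raises IndexError, or recurses forever for col < 0).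
def Pre_numNoNulasCol (A : List (List Int)) (fil : Int) (col : Int) : Prop :=
  0 ≤ col ∧ PySem.Raise.InRange A.length fil ∧ col < ((PySem.List.pyGetD A fil []).length : Int)
instance (A : List (List Int)) (fil : Int) (col : Int) : Decidable (Pre_numNoNulasCol A fil col) := by unfold Pre_numNoNulasCol; infer_instance

def pvWitness_numNoNulasCol : List (List Int) × Int × Int := ([[1, 0, 2]], 0, 2)

def Spec_numNoNulasCol (A : List (List Int)) (fil : Int) (col : Int) (out : Int) : Prop := out = numNoNulasCol_alt A fil col
instance (A : List (List Int)) (fil : Int) (col : Int) (out : Int) : Decidable (Spec_numNoNulasCol A fil col out) := by unfold Spec_numNoNulasCol; infer_instance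

-- ===== CLAIM (what is proved, stated in full; the proofs are below) =====
def Claim_equal_numNoNulasCol : Prop := ∀ (A : List (List Int)) (fil : Int) (col : Int), Dom_numNoNulasCol A fil col → Pre_numNoNulasCol A fil col → Spec_numNoNulasCol A fil col (numNoNulasCol A fil col)

-- ===== LEMMAS AND PROOFS =====
lemma go_eq_foldl (A : List (List Int)) (fil : Int) (n : Nat) :
    numNoNulasColGo A fil n =
      (PySem.List.pyRange 0 ((n : Int) + 1) 1).foldl
        (fun r i => if PySem.List.pyGetD (PySem.List.pyGetD A fil []) i 0 ≠ 0 then r + 1 else r) 0 := by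
  induction n with
  | zero =>
      rw [show ((0 : Nat) : Int) + 1 = 0 + 1 by omega, PySem.List.pyRange_one_singleton]
      simp [numNoNulasColGo, List.foldl]
  | succ n ih =>
      rw [show ((n + 1 : Nat) : Int) + 1 = ((n : Int) + 1) + 1 by push_cast; ring,
          PySem.List.pyRange_one_succ_right (by omega), List.foldl_append]
      simp only [numNoNulasColGo, List.foldl, ih]
      split_ifs
      all_goals try simp_all
      all_goals omega

-- ===== VERDICT (by name: the statement is the Claim_ definition above) =====
theorem numNoNulasCol_spec : Claim_equal_numNoNulasCol := by
  intro A fil col _ hpre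
  obtain ⟨hc, -, -⟩ := hpre
  unfold Spec_numNoNulasCol numNoNulasCol numNoNulasCol_alt
  rw [go_eq_foldl A fil col.toNat, Int.toNat_of_nonneg hc]
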